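-- pv_equiv track=rewrite | github.com/BYBETA123/Wordle | Wordle.py | Alpha_Counter
-- ===== SOURCE A (Python) =====
-- def Alpha_Counter(word):
--     Alphabet=["a","b","c","d","e","f","g","h","i","j","k","l","m","n","o","p","q","r","s","t","u","v","w","x","y","z"]
--     Counter=[0,0,0,0,0,0,0,0,0,0,0,0,0,0,0,0,0,0,0,0,0,0,0,0,0,0]
--     word_list=[]
--     result=0
--     for char in word:
--         word_list.append(char)
--
--     for i in range(len(word_list)):
--         for j in range(len(Alphabet)):
--             if word_list[i]==Alphabet[j]:
--                 Counter[j]+=1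
--
--     for i in range(26):
--         if Counter[i]>1:
--             result=1
--     return result
-- ===== SOURCE B (Python) =====
-- def Alpha_Counter(word):
--     seen = set()
--     for char in word:
--         if 'a' <= char <= 'z':
--             if char in seen:
--                 return 1
--             seen.add(char)
--     return 0
-- ===== Notes on version B (the rewrite author's own statement) =====
-- stated objective: simpler
-- what changed: Replaces the 26-letter frequency table built by nested loops plus a final scan with a single early-exit pass keeping a set of lowercase letters already seen.
import Mathlib
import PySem

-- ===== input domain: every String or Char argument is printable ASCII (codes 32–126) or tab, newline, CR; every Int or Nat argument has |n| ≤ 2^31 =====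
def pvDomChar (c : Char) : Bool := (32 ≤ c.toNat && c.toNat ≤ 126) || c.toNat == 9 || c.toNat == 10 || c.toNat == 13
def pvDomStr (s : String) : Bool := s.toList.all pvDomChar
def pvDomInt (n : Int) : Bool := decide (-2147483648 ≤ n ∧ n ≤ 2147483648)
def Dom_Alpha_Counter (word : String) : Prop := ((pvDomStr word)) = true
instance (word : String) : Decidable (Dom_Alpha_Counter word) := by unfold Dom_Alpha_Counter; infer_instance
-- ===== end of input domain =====

-- B replaces A's 26-letter frequency table (nested loops + final scan) with a single
-- early-exit pass keeping a set of lowercase letters already seen; simpler, same result.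


-- ===== PORT A =====
-- "Alphabet=['a',...,'z']"
def pvAlphabet : List Char :=
  ['a','b','c','d','e','f','g','h','i','j','k','l','m','n','o','p','q','r','s','t','u','v','w','x','y','z']

-- inner loop "for j in range(len(Alphabet)): if word_list[i]==Alphabet[j]: Counter[j]+=1":
-- walks Alphabet and Counter in lockstep (same comparisons, same increments, same order)
def pvInner (c : Char) : List Char → List Int → List Int
  | a :: as, n :: ns => (if c == a then n + 1 else n) :: pvInner c as ns
  | _, ns => ns

-- outer loop "for i in range(len(word_list)): ..."
def pvOuter : List Char → List Int → List Int
  | [], cnt => cnt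
  | c :: rest, cnt => pvOuter rest (pvInner c pvAlphabet cnt)

-- "for char in word: word_list.append(char)" = word.toList; then the nested count loops;
-- then "for i in range(26): if Counter[i]>1: result=1"
def Alpha_Counter (word : String) : Int :=
  (pvOuter word.toList (List.replicate 26 0)).foldl
    (fun r n => if n > 1 then (1 : Int) else r) 0

-- ===== PORT B =====
-- single pass with a set of already-seen lowercase letters, early exit on a repeat
def pvScan : List Char → PySem.Set Char → Int
  | [], _ => 0
  | c :: rest, seen =>
    if 'a' ≤ c ∧ c ≤ 'z' then
      if c ∈ seen then 1 else pvScan rest (PySem.Set.add seen c)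
    else pvScan rest seen

def Alpha_Counter_alt (word : String) : Int := pvScan word.toList PySem.Set.empty

-- ===== PRECONDITION & SPEC =====
def Spec_Alpha_Counter (word : String) (out : Int) : Prop := out = Alpha_Counter_alt word
instance (word : String) (out : Int) : Decidable (Spec_Alpha_Counter word out) := by unfold Spec_Alpha_Counter; infer_instance

-- ===== CLAIM (what is proved, stated in full; the proofs are below) =====
def Claim_equal_Alpha_Counter : Prop := ∀ (word : String), Dom_Alpha_Counter word → Spec_Alpha_Counter word (Alpha_Counter word)

-- ===== LEMMAS AND PROOFS =====

theorem char_le_iff {a b : Char} : a ≤ b ↔ a.toNat ≤ b.toNat := by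
  rw [Char.le_def, UInt32.le_iff_toNat_le]; rfl

theorem char_eq_iff {a b : Char} : a = b ↔ a.toNat = b.toNat := by
  constructor
  · intro h; rw [h]
  · intro h; exact Char.ext (UInt32.toNat_inj.mp h)

theorem pvInner_map (c : Char) (as : List Char) (f : Char → Int) :
    pvInner c as (as.map f) = as.map (fun a => if c == a then f a + 1 else f a) := by
  induction as with
  | nil => rfl
  | cons a as ih => simp [pvInner, ih]

theorem pvOuter_map (l : List Char) (f : Char → Int) :
    pvOuter l (pvAlphabet.map f) = pvAlphabet.map (fun a => f a + (l.count a : Int)) := by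
  induction l generalizing f with
  | nil => simp [pvOuter]
  | cons c rest ih =>
    simp only [pvOuter, pvInner_map, ih]
    apply List.map_congr_left
    intro a _
    by_cases h : c = a
    · subst h; rw [List.count_cons_self]; simp; ring
    · rw [List.count_cons_of_ne h]
      simp [h]

theorem foldl_or (ns : List Int) (r : Int) :
    ns.foldl (fun r n => if n > 1 then (1 : Int) else r) r
      = if (∃ n ∈ ns, n > 1) then 1 else r := by
  induction ns generalizing r with
  | nil => simp
  | cons n ns ih =>
    simp only [List.foldl_cons, ih]
    by_cases h : n > 1 <;> simp [h]

theorem mem_alphabet_iff (c : Char) : c ∈ pvAlphabet ↔ ('a' ≤ c ∧ c ≤ 'z') := by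
  constructor
  · intro h
    fin_cases h <;> exact ⟨by decide, by decide⟩
  · rintro ⟨h1, h2⟩
    rw [char_le_iff] at h1 h2
    simp at h1 h2
    simp only [pvAlphabet, List.mem_cons, List.not_mem_nil, or_false, char_eq_iff]
    simp
    omega

theorem pvScan_char (l : List Char) (seen : PySem.Set Char) :
    pvScan l seen
      = if (∃ c ∈ l, ('a' ≤ c ∧ c ≤ 'z') ∧ (c ∈ seen ∨ 2 ≤ l.count c)) then 1 else 0 := by
  induction l generalizing seen with
  | nil => simp [pvScan]
  | cons c rest ih =>
    simp only [pvScan]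
    by_cases hl : ('a' ≤ c ∧ c ≤ 'z')
    · rw [if_pos hl]
      by_cases hs : c ∈ seen
      · rw [if_pos hs, if_pos ⟨c, List.mem_cons_self, hl, Or.inl hs⟩]
      · rw [if_neg hs, ih]
        refine if_congr ?_ rfl rfl
        constructor
        · rintro ⟨d, hd, hld, hmem⟩
          by_cases hdc : d = c
          · subst hdc
            refine ⟨d, List.mem_cons_self, hld, Or.inr ?_⟩
            have h1 : 0 < rest.count d := List.count_pos_iff.mpr hd
            rw [List.count_cons_self]
            omega
          · refine ⟨d, List.mem_cons_of_mem _ hd, hld, ?_⟩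
            rcases hmem with hm | hc
            · rcases (PySem.Set.mem_add _ _ _).mp hm with hm | hm
              · exact Or.inl hm
              · exact absurd hm hdc
            · right; rwa [List.count_cons_of_ne (Ne.symm hdc)]
        · rintro ⟨d, hd, hld, hmem⟩
          rcases List.mem_cons.mp hd with hdc | hdrest
          · subst hdc
            rcases hmem with hm | hc
            · exact absurd hm hs
            · rw [List.count_cons_self] at hc
              have h1 : 0 < rest.count d := by omega
              exact ⟨d, List.count_pos_iff.mp h1, hld,
                Or.inl ((PySem.Set.mem_add _ _ _).mpr (Or.inr rfl))⟩
          · by_cases hdc : d = c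
            · subst hdc
              exact ⟨d, hdrest, hld, Or.inl ((PySem.Set.mem_add _ _ _).mpr (Or.inr rfl))⟩
            · refine ⟨d, hdrest, hld, ?_⟩
              rcases hmem with hm | hc
              · exact Or.inl ((PySem.Set.mem_add _ _ _).mpr (Or.inl hm))
              · right; rwa [List.count_cons_of_ne (Ne.symm hdc)] at hc
    · rw [if_neg hl, ih]
      refine if_congr ?_ rfl rfl
      constructor
      · rintro ⟨d, hd, hld, hmem⟩
        have hdc : d ≠ c := fun h => hl (h ▸ hld)
        refine ⟨d, List.mem_cons_of_mem _ hd, hld, ?_⟩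
        rcases hmem with hm | hc
        · exact Or.inl hm
        · right; rwa [List.count_cons_of_ne (Ne.symm hdc)]
      · rintro ⟨d, hd, hld, hmem⟩
        have hdc : d ≠ c := fun h => hl (h ▸ hld)
        rcases List.mem_cons.mp hd with h | h
        · exact absurd h hdc
        · refine ⟨d, h, hld, ?_⟩
          rcases hmem with hm | hc
          · exact Or.inl hm
          · right; rwa [List.count_cons_of_ne (Ne.symm hdc)] at hc

theorem replicate_as_map : List.replicate 26 (0 : Int) = pvAlphabet.map (fun _ => 0) := rfl

theorem exists_iff (l : List Char) :
    (∃ a ∈ pvAlphabet, (0 : Int) + (l.count a : Int) > 1)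
      ↔ (∃ c ∈ l, ('a' ≤ c ∧ c ≤ 'z') ∧ (c ∈ (PySem.Set.empty : PySem.Set Char) ∨ 2 ≤ l.count c)) := by
  constructor
  · rintro ⟨a, ha, hcnt⟩
    have h2 : 2 ≤ l.count a := by omega
    have hmem : a ∈ l := List.count_pos_iff.mp (by omega)
    exact ⟨a, hmem, (mem_alphabet_iff a).mp ha, Or.inr h2⟩
  · rintro ⟨c, hc, hlc, hmem⟩
    rcases hmem with hm | h2
    · simp [PySem.Set.empty] at hm
    · exact ⟨c, (mem_alphabet_iff c).mpr hlc, by omega⟩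

-- ===== VERDICT (by name: the statement is the Claim_ definition above) =====
theorem Alpha_Counter_spec : Claim_equal_Alpha_Counter := by
  intro word _
  show Alpha_Counter word = Alpha_Counter_alt word
  unfold Alpha_Counter Alpha_Counter_alt
  rw [replicate_as_map, pvOuter_map, foldl_or, pvScan_char]
  refine if_congr ?_ rfl rfl
  constructor
  · rintro ⟨n, hn, h1⟩
    rcases List.mem_map.mp hn with ⟨a, ha, rfl⟩
    exact (exists_iff word.toList).mp ⟨a, ha, h1⟩
  · intro h
    rcases (exists_iff word.toList).mpr h with ⟨a, ha, h1⟩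
    exact ⟨_, List.mem_map_of_mem ha, h1⟩
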